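-- pv_equiv track=rewrite | github.com/calvinbaart/AdventOfCode2018 | day8/part1.py | process
-- ===== SOURCE A (Python) =====
-- def process(input):
--     num_children = input.pop()
--     num_metadata = input.pop()
--     metadata = []
--
--     for _ in range(0, num_children):
--         metadata = metadata + process(input)
--
--     for x in range(0, num_metadata):
--         metadata.append(input.pop())
--
--     return metadata
-- ===== SOURCE B (Python) =====
-- def process(input):
--     # iterative: explicit stack of frames [children_left, num_metadata, metadata_acc]
--     stack = [[input.pop(), input.pop(), []]]
--     while True:
--         top = stack[-1]
--         if top[0] > 0:
--             top[0] -= 1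
--             stack.append([input.pop(), input.pop(), []])
--         else:
--             for _ in range(top[1]):
--                 top[2].append(input.pop())
--             frame = stack.pop()
--             if not stack:
--                 return frame[2]
--             stack[-1][2].extend(frame[2])
-- ===== Notes on version B (the rewrite author's own statement) =====
-- stated objective: alternative
-- what changed: A's recursive descent (recursion per node, children handled by a for-loop of recursive calls) is replaced by a single iterative while-loop over an explicit stack of frames (children-left, metadata-count, accumulator), popping the same header/metadata values off the end of the list in the same order.
import Mathlib
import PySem

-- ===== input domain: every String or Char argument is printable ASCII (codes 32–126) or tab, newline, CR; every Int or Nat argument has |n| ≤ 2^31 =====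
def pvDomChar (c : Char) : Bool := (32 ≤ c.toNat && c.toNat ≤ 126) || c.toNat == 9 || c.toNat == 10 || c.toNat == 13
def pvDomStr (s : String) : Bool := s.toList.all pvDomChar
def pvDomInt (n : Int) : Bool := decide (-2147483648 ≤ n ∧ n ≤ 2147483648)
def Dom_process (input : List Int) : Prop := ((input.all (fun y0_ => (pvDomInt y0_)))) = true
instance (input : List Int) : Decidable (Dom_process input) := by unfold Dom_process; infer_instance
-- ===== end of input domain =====

-- B replaces A's recursion by an explicit stack of frames (alternative decomposition, same cost);
-- equality proved is about the RETURN value (both Pythons pop the same elements off `input` in the same order).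

-- ===== PORT A =====
-- the metadata-reading loop `for x in range(0, nm): metadata.append(input.pop())`
-- (textually identical in A and B, so shared); the subtype carries the length fact
-- needed only for termination of the callers.
-- `input.pop()` (PySem.List.pop? at the default index -1), bundled with the length
-- fact the callers' termination proofs need
def popS (inp : List Int) : Option (Int × {r : List Int // r.length + 1 = inp.length}) :=
  match h : PySem.List.pop? inp (-1) with
  | none => none
  | some (x, r) => some (x, ⟨r, PySem.List.length_of_pop?_eq_some inp h⟩)

def readMetaS (k : Nat) (md : List Int) (inp : List Int) :
    Option (List Int × {r : List Int // r.length ≤ inp.length}) :=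
  match k with
  | 0 => some (md, ⟨inp, le_refl _⟩)
  | k + 1 =>
    match popS inp with
    | none => none
    | some (x, ⟨inp', hl⟩) =>
      match readMetaS k (md ++ [x]) inp' with
      | none => none
      | some (md', ⟨r, hr⟩) => some (md', ⟨r, by omega⟩)

mutual
-- A's `process`: pop header, children loop, metadata loop; subtype = termination bookkeeping only
def processA (inp : List Int) : Option (List Int × {r : List Int // r.length + 2 ≤ inp.length}) :=
  match popS inp with
  | none => none
  | some (nc, ⟨i1, _l1⟩) =>
    match popS i1 with
    | none => none
    | some (nm, ⟨i2, l2⟩) =>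
      match childrenA nc.toNat [] i2 with
      | none => none
      | some (md, ⟨i3, h3⟩) =>
        match readMetaS nm.toNat md i3 with
        | none => none
        | some (md', ⟨i4, h4⟩) => some (md', ⟨i4, by omega⟩)
termination_by (inp.length, 0)
decreasing_by exact Prod.Lex.left _ _ (by omega)

-- A's `for _ in range(0, num_children): metadata = metadata + process(input)`
def childrenA (k : Nat) (md : List Int) (inp : List Int) :
    Option (List Int × {r : List Int // r.length ≤ inp.length}) :=
  match k with
  | 0 => some (md, ⟨inp, le_refl _⟩)
  | k + 1 =>
    match processA inp with
    | none => none
    | some (cm, ⟨inp', h⟩) =>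
      match childrenA k (md ++ cm) inp' with
      | none => none
      | some (md', ⟨r, hr⟩) => some (md', ⟨r, by omega⟩)
termination_by (inp.length, k + 1)
decreasing_by
  · exact Prod.Lex.right _ (by omega)
  · exact Prod.Lex.left _ _ (by omega)
end

def process (input : List Int) : List Int :=
  match processA input with
  | none => []          -- Python raises IndexError here (outside Pre_)
  | some (md, _) => md

-- ===== PORT B =====
-- the `while True` loop over the explicit stack of frames (childrenLeft, numMetadata, acc)
def altLoop (inp : List Int) (stack : List (Int × Int × List Int)) : Option (List Int) :=
  match stack with
  | [] => none          -- unreachable: B returns when the stack empties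
  | (c, m, acc) :: rest =>
    if c > 0 then
      match popS inp with
      | none => none
      | some (nc, ⟨i1, _l1⟩) =>
        match popS i1 with
        | none => none
        | some (nm, ⟨i2, l2⟩) => altLoop i2 ((nc, nm, []) :: (c - 1, m, acc) :: rest)
    else
      match readMetaS m.toNat acc inp with
      | none => none
      | some (acc', ⟨i', _h⟩) =>
        match rest with
        | [] => some acc'
        | (c2, m2, acc2) :: rs => altLoop i' ((c2, m2, acc2 ++ acc') :: rs)
termination_by 2 * inp.length + stack.length
decreasing_by
  · simp; omega
  · simp; omega

def process_alt (input : List Int) : List Int :=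
  match popS input with
  | none => []          -- Python raises IndexError here (outside Pre_)
  | some (nc, ⟨i1, _⟩) =>
    match popS i1 with
    | none => []
    | some (nm, ⟨i2, _⟩) => (altLoop i2 [(nc, nm, [])]).getD []

-- ===== PRECONDITION & SPEC =====
-- pushdown recognizer for the input language: `input`, read from its end, must start with a
-- complete serialized tree (header nc nm, nc subtrees, nm metadata); leftover prefix is allowed.
-- popC pops finished frames (no children, no metadata left) off the stack.
def popC (st : List (Int × Int)) : List (Int × Int) :=
  match st with
  | [] => []
  | (c, m) :: st' => if c ≤ 0 ∧ m ≤ 0 then popC st' else (c, m) :: st'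

def scan (rev : List Int) (st : List (Int × Int)) : Bool :=
  match rev, st with
  | _, [] => true
  | [], (_, _) :: _ => false
  | nc :: rev', (c, m) :: st' =>
    if c > 0 then
      match rev' with
      | nm :: rev'' => scan rev'' (popC ((nc, nm) :: (c - 1, m) :: st'))
      | [] => false
    else if m > 0 then scan rev' (popC ((c, m - 1) :: st'))
    else true         -- unreachable: popC keeps the stack free of finished frames

-- Pre_ excludes exactly the inputs on which Python A raises IndexError (popping an exhausted list).
def Pre_process (input : List Int) : Prop := scan input.reverse [(1, 0)] = true
instance (input : List Int) : Decidable (Pre_process input) := by unfold Pre_process; infer_instance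

def pvWitness_process : List Int := [99, 1, 0]

def Spec_process (input : List Int) (out : List Int) : Prop := out = process_alt input
instance (input : List Int) (out : List Int) : Decidable (Spec_process input out) := by unfold Spec_process; infer_instance

-- ===== CLAIM (what is proved, stated in full; the proofs are below) =====
def Claim_equal_process : Prop := ∀ (input : List Int), Dom_process input → Pre_process input → Spec_process input (process input)

-- ===== LEMMAS AND PROOFS =====

-- one `while` iteration of B, frame still expecting children
theorem altLoop_open (inp : List Int) (c m : Int) (acc : List Int)
    (rest : List (Int × Int × List Int)) (hc : c > 0) :
    altLoop inp ((c, m, acc) :: rest) =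
      match popS inp with
      | none => none
      | some (nc, i1) =>
        match popS i1.1 with
        | none => none
        | some (nm, i2) => altLoop i2.1 ((nc, nm, []) :: (c - 1, m, acc) :: rest) := by
  rw [altLoop.eq_def]
  simp only [hc, if_pos]
  rcases hp1 : popS inp with _ | ⟨nc, i1, hl1⟩ <;> simp
  rcases hp2 : popS i1 with _ | ⟨nm, i2, hl2⟩ <;> simp

-- one `while` iteration of B, frame out of children: read metadata and close
theorem altLoop_close (inp : List Int) (c m : Int) (acc : List Int)
    (rest : List (Int × Int × List Int)) (hc : ¬ c > 0) :
    altLoop inp ((c, m, acc) :: rest) =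
      match readMetaS m.toNat acc inp with
      | none => none
      | some (acc', r) =>
        match rest with
        | [] => some acc'
        | (c2, m2, acc2) :: rs => altLoop r.1 ((c2, m2, acc2 ++ acc') :: rs) := by
  rw [altLoop.eq_def]
  simp only [hc, if_false]
  rcases hr : readMetaS m.toNat acc inp with _ | ⟨acc', i', hi'⟩ <;> simp

-- the stack machine, run with top frame (c, m, acc), computes exactly A's
-- "finish the remaining c children from acc, then read m metadata", and then closes the frame.
theorem sim (n : Nat) : ∀ (inp : List Int), inp.length = n →
    ∀ (c m : Int) (acc : List Int) (rest : List (Int × Int × List Int)),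
    altLoop inp ((c, m, acc) :: rest) =
      match childrenA c.toNat acc inp with
      | none => none
      | some (md, r3) =>
        match readMetaS m.toNat md r3.1 with
        | none => none
        | some (md', r4) =>
          match rest with
          | [] => some md'
          | (c2, m2, acc2) :: rs => altLoop r4.1 ((c2, m2, acc2 ++ md') :: rs) := by
  induction n using Nat.strong_induction_on with
  | _ n ih =>
    intro inp hn c m acc rest
    by_cases hc : c > 0
    · -- open a child: one machine step, then the IH twice (child frame, then parent frame)
      have hk : c.toNat = (c - 1).toNat + 1 := by omega
      rw [altLoop_open inp c m acc rest hc, hk, childrenA.eq_def, processA.eq_def]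
      rcases hp1 : popS inp with _ | ⟨nc, i1, hl1⟩
      · simp
      rcases hp2 : popS i1 with _ | ⟨nm, i2, hl2⟩
      · simp [hp2]
      simp only [hp2]
      rw [ih i2.length (by omega) i2 rfl nc nm [] ((c - 1, m, acc) :: rest)]
      rcases hA : childrenA nc.toNat [] i2 with _ | ⟨cm, r3⟩ <;> simp
      rcases hB : readMetaS nm.toNat cm r3.1 with _ | ⟨cm', r4⟩ <;> simp
      rw [ih r4.1.length (by have := r4.2; have := r3.2; omega) r4.1 rfl (c - 1) m (acc ++ cm') rest]
      have hck : c.toNat - 1 = (c - 1).toNat := by omega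
      simp only [hck]
      rcases hC : childrenA (c - 1).toNat (acc ++ cm') r4.1 with _ | ⟨md', r5⟩
      · simp
      · simp only [hC]
        rcases hD : readMetaS m.toNat md' r5.1 with _ | ⟨md2, r6⟩ <;> simp
    · -- no children left: c.toNat = 0, childrenA is the identity
      have h0 : c.toNat = 0 := by omega
      rw [altLoop_close inp c m acc rest hc, h0, childrenA.eq_def]
      simp
      rcases hr : readMetaS m.toNat acc inp with _ | ⟨acc', r⟩ <;> simp

theorem total_eq (input : List Int) : process input = process_alt input := by
  unfold process process_alt
  rw [processA.eq_def]
  rcases hp1 : popS input with _ | ⟨nc, i1, hl1⟩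
  · simp
  rcases hp2 : popS i1 with _ | ⟨nm, i2, hl2⟩
  · simp [hp2]
  simp only [hp2]
  rw [sim i2.length i2 rfl nc nm [] []]
  rcases hA : childrenA nc.toNat [] i2 with _ | ⟨cm, r3⟩ <;> simp
  rcases hB : readMetaS nm.toNat cm r3.1 with _ | ⟨cm', r4⟩ <;> simp

-- ===== VERDICT (by name: the statement is the Claim_ definition above) =====
theorem process_spec : Claim_equal_process := by
  intro input _ _
  unfold Spec_process
  exact total_eq input
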